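-- pv_equiv track=rewrite | github.com/Harchytekt/IPv4-Delmotte | code/Delmotte.py | isAnAddress
-- ===== SOURCE A (Python) =====
-- def isAnAddress(ip):
-- 	"""
-- 	Verifies if the given IPv4 address has the good format.
-- 	"""
-- 	if not '.' in ip :
-- 		return False
-- 	elif not len(ip.split('.')) == 4 :
-- 		return False
-- 	else:
-- 		for item in ip.split('.'):
-- 			if not item.isdecimal():
-- 				return False
-- 	return True
-- ===== SOURCE B (Python) =====
-- def isAnAddress(ip):
-- 	"""
-- 	Verifies if the given IPv4 address has the good format.
-- 	Single left-to-right scan: count dots, require every dot-separated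
-- 	segment to be a nonempty run of decimal characters, exactly 3 dots.
-- 	"""
-- 	dots = 0
-- 	seg = 0
-- 	for ch in ip:
-- 		if ch == '.':
-- 			if seg == 0:
-- 				return False
-- 			dots += 1
-- 			seg = 0
-- 		elif ch.isdecimal():
-- 			seg += 1
-- 		else:
-- 			return False
-- 	return dots == 3 and seg > 0
-- ===== Notes on version B (the rewrite author's own statement) =====
-- stated objective: alternative
-- what changed: Replaced the split-then-test passes (membership test, split twice, per-token isdecimal) by one single left-to-right character scan that counts dots and validates each segment as it goes, never materialising the token list.
import Mathlib
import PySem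

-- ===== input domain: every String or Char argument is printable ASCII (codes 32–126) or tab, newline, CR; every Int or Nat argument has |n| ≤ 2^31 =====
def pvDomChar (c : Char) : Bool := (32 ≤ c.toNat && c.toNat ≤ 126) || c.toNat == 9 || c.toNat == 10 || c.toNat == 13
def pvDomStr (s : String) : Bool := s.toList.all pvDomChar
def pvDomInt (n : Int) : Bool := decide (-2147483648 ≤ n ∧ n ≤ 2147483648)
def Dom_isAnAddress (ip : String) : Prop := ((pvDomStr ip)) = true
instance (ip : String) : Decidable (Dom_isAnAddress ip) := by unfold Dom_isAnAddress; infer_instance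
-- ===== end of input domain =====

-- B replaces A's split-then-test passes by a single left-to-right character scan (alternative decomposition, same cost).


-- ===== PORT A =====
-- item.isdecimal() ported as PySem.Chars.strIsdigit (exact on the ASCII domain);
-- the for-loop with early `return False` is the List.all fold over the same tokens.
def isAnAddress (ip : String) : Bool :=
  if !(PySem.Str.isIn "." ip) then false
  else if !((PySem.Chars.splitOn ip.toList ['.']).length == 4) then false
  else (PySem.Chars.splitOn ip.toList ['.']).all PySem.Chars.strIsdigit

-- ===== PORT B =====
-- ch.isdecimal() ported as PySem.Chars.isdigit (exact on the ASCII domain).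
def altLoop : List Char → Nat → Nat → Bool
  | [], dots, seg => dots == 3 && decide (0 < seg)
  | c :: rest, dots, seg =>
    if c == '.' then
      if seg == 0 then false else altLoop rest (dots + 1) 0
    else if PySem.Chars.isdigit c then altLoop rest dots (seg + 1)
    else false

def isAnAddress_alt (ip : String) : Bool := altLoop ip.toList 0 0

-- ===== PRECONDITION & SPEC =====
def Spec_isAnAddress (ip : String) (out : Bool) : Prop := out = isAnAddress_alt ip
instance (ip : String) (out : Bool) : Decidable (Spec_isAnAddress ip out) := by unfold Spec_isAnAddress; infer_instance

-- ===== CLAIM (what is proved, stated in full; the proofs are below) =====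
def Claim_equal_isAnAddress : Prop := ∀ (ip : String), Dom_isAnAddress ip → Spec_isAnAddress ip (isAnAddress ip)

-- ===== LEMMAS AND PROOFS =====

/-- Structural version of `PySem.Chars.splitOn · ['.']` used only by the proofs. -/
def mySplit : List Char → List (List Char)
  | [] => [[]]
  | c :: rest =>
    if c = '.' then [] :: mySplit rest
    else (c :: (mySplit rest).headI) :: (mySplit rest).tail

theorem mySplit_ne_nil (cs : List Char) : mySplit cs ≠ [] := by
  cases cs with
  | nil => simp [mySplit]
  | cons c rest => simp only [mySplit]; split <;> simp

theorem splitOn_go_eq (fuel : Nat) :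
    ∀ (l cur : List Char) (acc : List (List Char)), l.length < fuel →
      PySem.Chars.splitOn.go ['.'] fuel l cur acc =
        acc.reverse ++ (cur.reverse ++ (mySplit l).headI) :: (mySplit l).tail := by
  induction fuel with
  | zero => intro l cur acc h; omega
  | succ fuel ih =>
    intro l cur acc h
    cases l with
    | nil => simp [PySem.Chars.splitOn.go, mySplit]
    | cons c rest =>
      by_cases hc : c = '.'
      · subst hc
        have : List.isPrefixOf ['.'] ('.' :: rest) = true := by simp [List.isPrefixOf]
        rw [PySem.Chars.splitOn.go]
        simp only [this, if_pos, List.length_cons, List.length_nil, Nat.zero_add, List.drop_succ_cons, List.drop_zero]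
        rw [ih rest [] (cur.reverse :: acc) (by simpa using Nat.lt_of_succ_lt_succ h)]
        rcases hsp : mySplit rest with _ | ⟨p, ps⟩
        · exact absurd hsp (mySplit_ne_nil rest)
        · simp [mySplit, hsp]
      · have : List.isPrefixOf ['.'] (c :: rest) = false := by
          simp [List.isPrefixOf]; exact fun h' => hc h'.symm
        rw [PySem.Chars.splitOn.go]
        simp only [this, Bool.false_eq_true, if_false]
        rw [ih rest (c :: cur) acc (by simpa using Nat.lt_of_succ_lt_succ h)]
        simp [mySplit, hc]

theorem splitOn_eq_mySplit (cs : List Char) :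
    PySem.Chars.splitOn cs ['.'] = mySplit cs := by
  rw [PySem.Chars.splitOn, splitOn_go_eq (cs.length + 1) cs [] [] (by omega)]
  rcases hsp : mySplit cs with _ | ⟨p, ps⟩
  · exact absurd hsp (mySplit_ne_nil cs)
  · simp

theorem mem_dot_of_len (cs : List Char) (h : 2 ≤ (mySplit cs).length) : '.' ∈ cs := by
  induction cs with
  | nil => simp [mySplit] at h
  | cons c rest ih =>
    by_cases hc : c = '.'
    · simp [hc]
    · simp only [mySplit, hc, if_false] at h
      have hlen : (mySplit rest).length = ((c :: (mySplit rest).headI) :: (mySplit rest).tail).length := by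
        rcases hsp : mySplit rest with _ | ⟨p, ps⟩
        · exact absurd hsp (mySplit_ne_nil rest)
        · simp
      simp only [List.mem_cons]
      exact Or.inr (ih (by omega))

theorem altLoop_eq (cs : List Char) : ∀ (dots seg : Nat),
    altLoop cs dots seg =
      (decide (dots + (mySplit cs).length = 4) &&
       (decide (0 < seg) || !(mySplit cs).headI.isEmpty) &&
       (mySplit cs).headI.all PySem.Chars.isdigit &&
       (mySplit cs).tail.all PySem.Chars.strIsdigit) := by
  induction cs with
  | nil =>
    intro dots seg
    have h34 : (dots == 3) = decide (dots + 1 = 4) := by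
      by_cases h : dots = 3 <;> simp [h]
    simp [altLoop, mySplit, h34]
  | cons c rest ih =>
    intro dots seg
    by_cases hc : c = '.'
    · subst hc
      simp only [altLoop, mySplit, beq_self_eq_true, if_true]
      rcases hsp : mySplit rest with _ | ⟨p, ps⟩
      · exact absurd hsp (mySplit_ne_nil rest)
      · by_cases hseg : seg = 0
        · simp [hseg]
        · have hseg' : (seg == 0) = false := by simpa using hseg
          simp only [hseg', Bool.false_eq_true, if_false, ih (dots + 1) 0, hsp]
          simp only [List.headI, List.tail_cons, List.all_cons, PySem.Chars.strIsdigit,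
            Nat.pos_of_ne_zero hseg, decide_true, Bool.true_or,
            Nat.lt_irrefl, decide_false, Bool.false_or, List.length_cons, List.all_nil,
            Bool.and_true, List.isEmpty_nil, Bool.not_true]
          have h4 : (dots + 1 + (ps.length + 1) = 4) ↔ (dots + (ps.length + 1 + 1) = 4) := by omega
          simp only [h4, Bool.and_assoc]
          rfl
    · have hbeq : (c == '.') = false := by simpa using hc
      rcases hsp : mySplit rest with _ | ⟨p, ps⟩
      · exact absurd hsp (mySplit_ne_nil rest)
      · by_cases hd : PySem.Chars.isdigit c = true
        · simp only [altLoop, hbeq, Bool.false_eq_true, if_false, hd, if_true,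
            ih dots (seg + 1), mySplit, hc, hsp]
          simp only [List.all_cons, hd, Bool.true_and, List.length_cons, Bool.and_assoc,
            List.headI, List.tail_cons, decide_true, Bool.true_or, Nat.zero_lt_succ,
            List.isEmpty_cons, Bool.or_true, Bool.not_false]
          rfl
        · have hd' : PySem.Chars.isdigit c = false := by simpa using hd
          simp only [altLoop, hbeq, Bool.false_eq_true, if_false, hd', mySplit, hc, hsp]
          simp [hd']

-- ===== VERDICT (by name: the statement is the Claim_ definition above) =====
theorem isAnAddress_spec : Claim_equal_isAnAddress := by
  intro ip _
  unfold Spec_isAnAddress isAnAddress isAnAddress_alt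
  rw [altLoop_eq, splitOn_eq_mySplit]
  rcases hsp : mySplit ip.toList with _ | ⟨p, ps⟩
  · exact absurd hsp (mySplit_ne_nil ip.toList)
  · by_cases hlen : (p :: ps).length = 4
    · have hmem : '.' ∈ ip.toList := mem_dot_of_len ip.toList (by rw [hsp]; simp at hlen ⊢; omega)
      have hin : PySem.Str.isIn "." ip = true := by
        rw [PySem.Str.isIn_iff_infix]
        exact (List.singleton_infix_iff '.' ip.toList).mpr hmem
      simp only [hin, Bool.not_true, Bool.false_eq_true, if_false, hlen, beq_self_eq_true,
        List.all_cons, List.headI, List.tail_cons, Nat.zero_add,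
        Nat.lt_irrefl, decide_false, Bool.false_or, PySem.Chars.strIsdigit]
      simp only [List.length_cons] at hlen
      simp [Bool.and_assoc]
    · have h3 : decide (ps.length = 3) = false := by
        simp only [List.length_cons] at hlen; simp; omega
      simp [h3]
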